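-- pv_equiv track=rewrite | github.com/Stoick643/specforge-factory | specforge/agents/tester.py | _deduplicate_errors
-- ===== SOURCE A (Python) =====
-- def _deduplicate_errors(pytest_output: str) -> str:
--     """Extract unique error types from pytest output with counts.
--
--     Turns 78 identical 'ValueError: password cannot be loaded' lines
--     into '(×78) ValueError: password cannot be loaded'.
--     """
--     from collections import Counter
--
--     error_lines: list[str] = []
--     for line in pytest_output.split("\n"):
--         line = line.strip()
--         # Match common error patterns
--         if any(marker in line for marker in ("Error:", "Exception:", "FAILED", "ImportError")):
--             # Normalize: strip test name prefix, keep just the error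
--             if " - " in line:
--                 error_part = line.split(" - ", 1)[1].strip()
--             elif "ERROR " in line:
--                 error_part = line
--             elif "FAILED " in line:
--                 error_part = line
--             else:
--                 error_part = line
--             error_lines.append(error_part)
--
--     if not error_lines:
--         # Fall back to last 20 lines
--         lines = [l.strip() for l in pytest_output.strip().split("\n") if l.strip()]
--         return "\n".join(lines[-20:])
--
--     # Count unique errors
--     counts = Counter(error_lines)
--     deduped = []
--     for error, count in counts.most_common(15):  # Top 15 unique errors
--         if count > 1:
--             deduped.append(f"(×{count}) {error}")
--         else:
--             deduped.append(error)
--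
--     return "\n".join(deduped)
-- ===== SOURCE B (Python) =====
-- def _deduplicate_errors(pytest_output: str) -> str:
--     """Extract unique error types from pytest output with counts.
--
--     Counting-sort variant: one pass counts normalized error lines into a
--     first-seen-order dict, errors are then grouped into buckets by count and
--     emitted by walking the count range downward (no comparison sort).
--     """
--     counts: dict[str, int] = {}
--     for raw in pytest_output.split("\n"):
--         line = raw.strip()
--         if ("Error:" in line or "Exception:" in line
--                 or "FAILED" in line or "ImportError" in line):
--             if " - " in line:
--                 line = line.split(" - ", 1)[1].strip()
--             counts[line] = counts.get(line, 0) + 1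
--
--     if not counts:
--         # Fall back to last 20 non-empty stripped lines
--         lines = [l.strip() for l in pytest_output.strip().split("\n") if l.strip()]
--         return "\n".join(lines[-20:])
--
--     # Bucket errors by their count (insertion order preserved inside a bucket)
--     buckets: dict[int, list[str]] = {}
--     for e, c in counts.items():
--         buckets.setdefault(c, []).append(e)
--
--     # Walk counts from the maximum down to 1: counting-sort order = stable
--     # descending sort = Counter.most_common order; keep the top 15.
--     out: list[str] = []
--     for c in range(max(counts.values()), 0, -1):
--         for e in buckets.get(c, []):
--             out.append(f"(×{c}) {e}" if c > 1 else e)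
--     return "\n".join(out[:15])
-- ===== Notes on version B (the rewrite author's own statement) =====
-- stated objective: alternative
-- what changed: B drops the error-lines list and Counter.most_common comparison sort: it counts normalized lines directly into a first-seen-order dict in one pass, groups errors into buckets keyed by count, and emits the top 15 by walking the count range from max(counts.values()) down to 1 (a counting-sort selection), which reproduces most_common's stable descending order and insertion-order tie-break.
import Mathlib
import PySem

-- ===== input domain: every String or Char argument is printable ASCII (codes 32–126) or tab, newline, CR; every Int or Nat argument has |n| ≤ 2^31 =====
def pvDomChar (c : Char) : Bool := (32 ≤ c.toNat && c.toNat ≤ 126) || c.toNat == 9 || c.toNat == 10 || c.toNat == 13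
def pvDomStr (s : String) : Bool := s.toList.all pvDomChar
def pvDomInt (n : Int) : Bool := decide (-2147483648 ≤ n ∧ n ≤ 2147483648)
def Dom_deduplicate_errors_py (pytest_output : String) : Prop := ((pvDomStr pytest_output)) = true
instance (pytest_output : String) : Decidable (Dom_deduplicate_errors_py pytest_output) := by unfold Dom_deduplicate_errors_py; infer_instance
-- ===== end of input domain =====

-- B replaces A's Counter/most_common comparison sort by a counting-sort selection: one pass counts
-- into a first-seen-order dict, errors are bucketed by count, and buckets are emitted walking the
-- count range downward (objective: alternative).


-- ===== PORT A =====
-- any(marker in line for marker in ("Error:", "Exception:", "FAILED", "ImportError"))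
def pvMarkersA (line : String) : Bool :=
  PySem.Str.isIn "Error:" line || PySem.Str.isIn "Exception:" line ||
  PySem.Str.isIn "FAILED" line || PySem.Str.isIn "ImportError" line

-- A's normalization branch chain (the "ERROR "/"FAILED " elifs keep the line, like the else)
def pvNormA (line : String) : String :=
  if PySem.Str.isIn " - " line then
    PySem.Str.strip (((PySem.Str.splitMax? line " - " 1).getD []).getD 1 "")
  else if PySem.Str.isIn "ERROR " line then line
  else if PySem.Str.isIn "FAILED " line then line
  else line

-- the error_lines collection loop
def pvErrorLinesA (pytest_output : String) : List String :=
  ((PySem.Str.split? pytest_output "\n").getD []).foldl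
    (fun acc raw =>
      if pvMarkersA (PySem.Str.strip raw) then acc ++ [pvNormA (PySem.Str.strip raw)] else acc) []

-- fallback: "\n".join([l.strip() for l in pytest_output.strip().split("\n") if l.strip()][-20:])
def pvFallbackA (pytest_output : String) : String :=
  PySem.Str.join "\n" (PySem.List.slice
    (((PySem.Str.split? (PySem.Str.strip pytest_output) "\n").getD []).foldl
      (fun acc l => if PySem.Str.strip l ≠ "" then acc ++ [PySem.Str.strip l] else acc) [])
    (some (-20)) none)

-- Counter(error_lines).most_common(15) = sorted(items, key=λkv.kv[1], reverse=True)[:15], then the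
-- deduped-append loop and join
def pvMainA (error_lines : List String) : String :=
  PySem.Str.join "\n"
    (((PySem.List.sorted (PySem.Dict.counter error_lines).items (fun kv => kv.2) true).take 15).foldl
      (fun acc p =>
        if p.2 > 1 then acc ++ ["(×" ++ PySem.Int.toStr p.2 ++ ") " ++ p.1] else acc ++ [p.1]) [])

def deduplicate_errors_py (pytest_output : String) : String :=
  if pvErrorLinesA pytest_output = [] then pvFallbackA pytest_output
  else pvMainA (pvErrorLinesA pytest_output)

-- ===== PORT B =====
def pvCondB (line : String) : Bool :=
  PySem.Str.isIn "Error:" line || PySem.Str.isIn "Exception:" line ||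
  PySem.Str.isIn "FAILED" line || PySem.Str.isIn "ImportError" line

def pvNormB (line : String) : String :=
  if PySem.Str.isIn " - " line then
    PySem.Str.strip (((PySem.Str.splitMax? line " - " 1).getD []).getD 1 "")
  else line

-- the single counting pass: counts[line] = counts.get(line, 0) + 1
def pvCountsB (pytest_output : String) : PySem.Dict String Int :=
  ((PySem.Str.split? pytest_output "\n").getD []).foldl
    (fun d raw =>
      if pvCondB (PySem.Str.strip raw) then
        d.insert (pvNormB (PySem.Str.strip raw)) (d.getD (pvNormB (PySem.Str.strip raw)) 0 + 1)
      else d) PySem.Dict.empty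

def pvFallbackB (pytest_output : String) : String :=
  PySem.Str.join "\n" (PySem.List.slice
    ((((PySem.Str.split? (PySem.Str.strip pytest_output) "\n").getD []).map PySem.Str.strip).filter
      (fun s => s ≠ "")) (some (-20)) none)

def pvFmtB (e : String) (c : Int) : String :=
  if c > 1 then "(×" ++ PySem.Int.toStr c ++ ") " ++ e else e

-- buckets: for e, c in counts.items(): buckets.setdefault(c, []).append(e)
def pvBucketsB (counts : PySem.Dict String Int) : PySem.Dict Int (List String) :=
  counts.items.foldl (fun d p => d.modify p.2 [] (fun l => l ++ [p.1])) PySem.Dict.empty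

-- max(counts.values()) (only evaluated on a non-empty dict)
def pvMaxB (counts : PySem.Dict String Int) : Int :=
  (PySem.List.max? counts.values (fun v => v)).getD 0

-- the double loop: for c in range(max, 0, -1): for e in buckets.get(c, []): out.append(fmt)
-- then "\n".join(out[:15])
def pvOutB (counts : PySem.Dict String Int) : String :=
  PySem.Str.join "\n" (PySem.List.slice
    ((PySem.List.pyRange (pvMaxB counts) 0 (-1)).foldl
      (fun acc c => ((pvBucketsB counts).getD c []).foldl (fun acc2 e => acc2 ++ [pvFmtB e c]) acc)
      [])
    none (some 15))

def deduplicate_errors_py_alt (pytest_output : String) : String :=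
  if (pvCountsB pytest_output).items = [] then pvFallbackB pytest_output
  else pvOutB (pvCountsB pytest_output)

-- ===== PRECONDITION & SPEC =====
def Spec_deduplicate_errors_py (pytest_output : String) (out : String) : Prop := out = deduplicate_errors_py_alt pytest_output
instance (pytest_output : String) (out : String) : Decidable (Spec_deduplicate_errors_py pytest_output out) := by unfold Spec_deduplicate_errors_py; infer_instance

-- ===== CLAIM (what is proved, stated in full; the proofs are below) =====
def Claim_equal_deduplicate_errors_py : Prop := ∀ (pytest_output : String), Dom_deduplicate_errors_py pytest_output → Spec_deduplicate_errors_py pytest_output (deduplicate_errors_py pytest_output)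

-- ===== LEMMAS AND PROOFS =====

-- A's and B's normalization agree (A's "ERROR "/"FAILED " elifs all keep the line)
theorem pvNorm_eq (line : String) : pvNormB line = pvNormA line := by
  unfold pvNormA pvNormB
  split_ifs <;> rfl

-- a conditional counting loop into a dict equals counting the filtered, mapped list
theorem pvFoldl_if_insert (p : String → Bool) (f : String → String) (xs : List String) :
    xs.foldl (fun d x => if p x then d.insert (f x) (d.getD (f x) 0 + 1) else d)
        (PySem.Dict.empty : PySem.Dict String Int)
      = ((xs.filter p).map f).foldl (fun d k => d.insert k (d.getD k 0 + 1)) PySem.Dict.empty := by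
  suffices h : ∀ (ys : List String) (d : PySem.Dict String Int),
      ys.foldl (fun d x => if p x then d.insert (f x) (d.getD (f x) 0 + 1) else d) d
        = ((ys.filter p).map f).foldl (fun d k => d.insert k (d.getD k 0 + 1)) d from h xs _
  intro ys
  induction ys with
  | nil => intro d; rfl
  | cons x xs ih =>
    intro d
    by_cases h : p x = true <;> simp [List.foldl, List.filter, h, ih]

-- B's counting pass builds exactly Counter(A's error_lines)
theorem pvCounts_eq (s : String) : pvCountsB s = PySem.Dict.counter (pvErrorLinesA s) := by
  unfold pvCountsB pvErrorLinesA
  rw [pvFoldl_if_insert, PySem.Dict.foldl_insert_getD_add_one_eq_counter,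
      PySem.List.foldl_append_if]
  simp only [List.nil_append]
  have h2 : (fun raw => pvNormB (PySem.Str.strip raw)) = (fun raw => pvNormA (PySem.Str.strip raw)) := by
    funext raw; rw [pvNorm_eq]
  rw [h2]
  rfl

-- counter of a list has empty items iff the list is empty
theorem pvCounter_items_nil_iff (xs : List String) :
    (PySem.Dict.counter xs).items = [] ↔ xs = [] := by
  cases xs with
  | nil => simp [PySem.Dict.items_counter]
  | cons x xs =>
    simp only [PySem.Dict.items_counter]
    constructor
    · intro h
      exfalso
      have hx : x ∈ PySem.Set.ofList (x :: xs) := by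
        rw [PySem.Set.mem_ofList]; exact List.mem_cons_self
      rw [List.map_eq_nil_iff.mp h] at hx
      simp at hx
    · intro h; cases h

-- the stripped-nonempty collection loop is a filter of a map
theorem pvStripFold : ∀ (xs : List String) (acc : List String),
    xs.foldl (fun acc l => if PySem.Str.strip l ≠ "" then acc ++ [PySem.Str.strip l] else acc) acc
      = acc ++ (xs.map PySem.Str.strip).filter (fun s => s ≠ "") := by
  intro xs
  induction xs with
  | nil => intro acc; simp
  | cons x xs ih =>
    intro acc
    simp only [List.foldl_cons, List.map_cons, List.filter_cons]
    by_cases h : PySem.Str.strip x ≠ ""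
    · rw [if_pos h, ih]
      simp [h]
    · rw [if_neg h, ih]
      simp [h]

-- the two fallback computations agree
theorem pvFallback_eq (s : String) : pvFallbackA s = pvFallbackB s := by
  unfold pvFallbackA pvFallbackB
  rw [pvStripFold]
  simp only [List.nil_append]

-- insertBy passes over a prefix it does not insert before
theorem pvInsertBy_skip (p : (String × Int) → (String × Int) → Bool) (x : String × Int) :
    ∀ (as bs : List (String × Int)), (∀ a ∈ as, p x a = false) →
      PySem.List.insertBy p x (as ++ bs) = as ++ PySem.List.insertBy p x bs := by
  intro as
  induction as with
  | nil => intro bs _; simp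
  | cons a as ih =>
    intro bs h
    simp only [List.cons_append, PySem.List.insertBy, h a List.mem_cons_self]
    simp only [Bool.false_eq_true, if_false, List.cons.injEq, true_and]
    exact ih bs (fun a' ha' => h a' (List.mem_cons_of_mem a ha'))

-- insertBy puts x in front when it goes before everything
theorem pvInsertBy_front (p : (String × Int) → (String × Int) → Bool) (x : String × Int) :
    ∀ (ys : List (String × Int)), (∀ y ∈ ys, p x y = true) →
      PySem.List.insertBy p x ys = x :: ys := by
  intro ys h
  cases ys with
  | nil => rfl
  | cons y ys => simp [PySem.List.insertBy, h y List.mem_cons_self]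

-- inserting one element into a descending bucket concatenation appends it to its own bucket
theorem pvInsert_buckets (x : String × Int) :
    ∀ (cs : List Int) (l : List (String × Int)),
      cs.Pairwise (fun a b => b < a) → x.2 ∈ cs →
      PySem.List.insertBy (fun a b => decide (b.2 < a.2)) x
          (cs.flatMap (fun c => l.filter (fun kv => kv.2 == c)))
        = cs.flatMap (fun c => (l ++ [x]).filter (fun kv => kv.2 == c)) := by
  intro cs
  induction cs with
  | nil => intro l _ hx; cases hx
  | cons c cs ih =>
    intro l hp hx
    have hlt : ∀ c' ∈ cs, c' < c := (List.pairwise_cons.mp hp).1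
    have hfilt : ∀ c', ((l ++ [x]).filter (fun kv => kv.2 == c'))
        = l.filter (fun kv => kv.2 == c') ++ (if x.2 = c' then [x] else []) := by
      intro c'
      rw [List.filter_append, List.filter_singleton]
      by_cases h : x.2 = c' <;> simp [Bool.cond_eq_ite, h]
    by_cases hc : x.2 = c
    · -- x belongs to the first bucket: skip it, then insert before everything smaller
      rw [List.flatMap_cons,
          pvInsertBy_skip _ _ _ _ (by
            intro a ha
            have := List.of_mem_filter ha
            simp only [beq_iff_eq] at this
            simp [this, hc]),
          pvInsertBy_front _ _ _ (by
            intro y hy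
            obtain ⟨c', hc', hyf⟩ := List.mem_flatMap.mp hy
            have h2 := List.of_mem_filter hyf
            simp only [beq_iff_eq] at h2
            simp [h2, hc, hlt c' hc'])]
      rw [List.flatMap_cons, hfilt c, if_pos hc]
      have hrest : cs.flatMap (fun c' => (l ++ [x]).filter (fun kv => kv.2 == c'))
          = cs.flatMap (fun c' => l.filter (fun kv => kv.2 == c')) := by
        apply List.flatMap_congr  -- placeholder name; fixed below if absent
        intro c' hc'
        rw [hfilt c', if_neg (by have := hlt c' hc'; omega)]
        simp
      rw [hrest]
      simp
    · -- x belongs to a later bucket: skip the first bucket and recurse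
      have hx' : x.2 ∈ cs := by cases List.mem_cons.mp hx with
        | inl h => exact absurd h hc
        | inr h => exact h
      rw [List.flatMap_cons,
          pvInsertBy_skip _ _ _ _ (by
            intro a ha
            have h2 := List.of_mem_filter ha
            simp only [beq_iff_eq] at h2
            have : x.2 < c := by
              rcases List.mem_cons.mp hx with h | h
              · exact absurd h hc
              · exact hlt _ h
            simp [h2]
            omega),
          ih l (List.pairwise_cons.mp hp).2 hx']
      rw [List.flatMap_cons, hfilt c, if_neg hc]
      simp

-- stable descending sort by an Int key is the bucket concatenation over any strictly
-- descending list of counts covering all keys (counting sort = stable sort)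
theorem pvBucket_sorted :
    ∀ (l : List (String × Int)) (cs : List Int),
      cs.Pairwise (fun a b => b < a) → (∀ p ∈ l, p.2 ∈ cs) →
      PySem.List.sorted l (fun kv => kv.2) true
        = cs.flatMap (fun c => l.filter (fun kv => kv.2 == c)) := by
  intro l
  induction l using List.reverseRecOn with
  | nil => intro cs _ _; simp [PySem.List.sorted]
  | append_singleton l x ih =>
    intro cs hp hmem
    rw [PySem.List.sorted_rev_eq_foldl_insertBy, List.foldl_append, List.foldl_cons,
        List.foldl_nil, ← PySem.List.sorted_rev_eq_foldl_insertBy,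
        ih cs hp (fun p hp' => hmem p (List.mem_append_left _ hp'))]
    exact pvInsert_buckets x cs l hp (hmem x (List.mem_append_right _ List.mem_cons_self))

-- the nested append loop is a flatMap of maps
theorem pvNestedFold (g : Int → List String) (f : String → Int → String) :
    ∀ (cs : List Int) (acc : List String),
      cs.foldl (fun acc c => (g c).foldl (fun a2 e => a2 ++ [f e c]) acc) acc
        = acc ++ cs.flatMap (fun c => (g c).map (fun e => f e c)) := by
  intro cs
  induction cs with
  | nil => intro acc; simp
  | cons c cs ih =>
    intro acc
    rw [List.foldl_cons, PySem.List.foldl_append_singleton_eq_map, ih, List.flatMap_cons,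
        List.append_assoc]

-- the bucket dict's lookup: the errors whose count is c, in insertion order
theorem pvBucketsB_getD (counts : PySem.Dict String Int) (c : Int) :
    (pvBucketsB counts).getD c [] = (counts.items.filter (fun p => p.2 == c)).map (fun p => p.1) := by
  unfold pvBucketsB
  have h : counts.items.foldl (fun d p => d.modify p.2 [] (fun l => l ++ [p.1]))
        (PySem.Dict.empty : PySem.Dict Int (List String))
      = (counts.items.map Prod.swap).foldl (fun d p => d.modify p.1 [] (fun l => l ++ [p.2]))
        PySem.Dict.empty := by
    rw [List.foldl_map]
    rfl
  rw [h, PySem.Dict.getD_foldl_modify_append, PySem.Dict.getD_empty, List.nil_append,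
      List.filter_map, List.map_map]
  rfl

-- the main branches agree
theorem pvMain_eq (el : List String) (hne : el ≠ []) :
    pvMainA el = pvOutB (PySem.Dict.counter el) := by
  unfold pvMainA pvOutB
  -- notation
  have hitems : (PySem.Dict.counter el).items ≠ [] := by
    intro h; exact hne ((pvCounter_items_nil_iff el).mp h)
  -- max(counts.values()) is some m
  obtain ⟨m, hm⟩ : ∃ m, PySem.List.max? (PySem.Dict.counter el).values (fun v => v) = some m := by
    cases hmx : PySem.List.max? (PySem.Dict.counter el).values (fun v => v) with
    | none =>
      exfalso
      have := (PySem.List.max?_eq_none_iff _ _).mp hmx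
      simp only [PySem.Dict.values] at this
      exact hitems (List.map_eq_nil_iff.mp this)
    | some m => exact ⟨m, rfl⟩
  have hmax : pvMaxB (PySem.Dict.counter el) = m := by unfold pvMaxB; rw [hm]; rfl
  -- every stored count lies in range(m, 0, -1)
  have hmem : ∀ p ∈ (PySem.Dict.counter el).items,
      p.2 ∈ PySem.List.pyRange (pvMaxB (PySem.Dict.counter el)) 0 (-1) := by
    intro p hp
    rw [hmax, PySem.List.mem_pyRange_neg_one]
    constructor
    · rw [PySem.Dict.items_counter] at hp
      obtain ⟨k, hk, hpk⟩ := List.mem_map.mp hp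
      have hkel : k ∈ el := (PySem.Set.mem_ofList _ _).mp hk
      have h2 : (0 : Int) < (el.count k : Int) := by
        exact_mod_cast List.count_pos_iff.mpr hkel
      rw [← hpk]
      exact h2
    · have hv : p.2 ∈ (PySem.Dict.counter el).values := by
        simp only [PySem.Dict.values]
        exact List.mem_map_of_mem hp
      exact PySem.List.max?_isMax hm p.2 hv
  -- descending pairwise on the count range
  have hdesc : (PySem.List.pyRange (pvMaxB (PySem.Dict.counter el)) 0 (-1)).Pairwise
      (fun a b => b < a) := by
    rw [PySem.List.pyRange_neg_one]
    apply List.pairwise_map.mpr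
    exact (List.pairwise_lt_range).imp (by intro i j hij; omega)
  -- A's side: the if-append loop over the top 15 is a map
  have hstep : (fun (acc : List String) (p : String × Int) =>
      if p.2 > 1 then acc ++ ["(×" ++ PySem.Int.toStr p.2 ++ ") " ++ p.1] else acc ++ [p.1])
      = fun acc p => acc ++ [pvFmtB p.1 p.2] := by
    funext acc p; unfold pvFmtB; by_cases h : p.2 > 1 <;> simp [h]
  rw [hstep, PySem.List.foldl_append_singleton_eq_map, List.nil_append]
  -- B's side: nested loop → flatMap, bucket lookup → filter, counting sort → stable sort
  rw [PySem.List.slice_to _ (by norm_num), pvNestedFold, List.nil_append]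
  have hbuck : (PySem.List.pyRange (pvMaxB (PySem.Dict.counter el)) 0 (-1)).flatMap
        (fun c => ((pvBucketsB (PySem.Dict.counter el)).getD c []).map (fun e => pvFmtB e c))
      = ((PySem.List.pyRange (pvMaxB (PySem.Dict.counter el)) 0 (-1)).flatMap
          (fun c => (PySem.Dict.counter el).items.filter (fun kv => kv.2 == c))).map
        (fun p => pvFmtB p.1 p.2) := by
    rw [List.map_flatMap]
    apply List.flatMap_congr
    intro c _
    rw [pvBucketsB_getD, List.map_map]
    apply List.map_congr_left
    intro p hp
    have := List.of_mem_filter hp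
    simp only [beq_iff_eq] at this
    simp [Function.comp, this]
  rw [hbuck, ← pvBucket_sorted _ _ hdesc hmem, ← List.map_take]
  rfl

theorem deduplicate_errors_py_eq (s : String) :
    deduplicate_errors_py s = deduplicate_errors_py_alt s := by
  unfold deduplicate_errors_py deduplicate_errors_py_alt
  rw [pvCounts_eq]
  by_cases h : pvErrorLinesA s = []
  · rw [if_pos h, if_pos ((pvCounter_items_nil_iff _).mpr h), pvFallback_eq]
  · rw [if_neg h, if_neg (fun hc => h ((pvCounter_items_nil_iff _).mp hc)), pvMain_eq _ h]

-- ===== VERDICT (by name: the statement is the Claim_ definition above) =====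
theorem deduplicate_errors_py_spec : Claim_equal_deduplicate_errors_py := by
  intro s _
  exact deduplicate_errors_py_eq s
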